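-- pv_equiv track=rewrite | github.com/ThaySolis/CDadosSeg | T2/Parte1/T2p1.py | separarPermissoes
-- ===== SOURCE A (Python) =====
-- def separarPermissoes(DictPermissoesPorAPK):
--     #Este dicionário guarda as permissões comuns a todas as APKs
--     DictPermsEmComum = {}
--     #Este dicionário guarda as permissões únicas por APK
--     DictPermsUnicasPorAPK = {}
--     #Para cada APK no dicionário original
--     for APK in DictPermissoesPorAPK:
--         #Para cada permissão em cada APK no dicionário original
--         for permissao in DictPermissoesPorAPK[APK]:
--             #Se a permissão já for chave de DictPermsEmComum, adiciona o nome da APK ao final do vetor de valores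
--             if permissao in DictPermsEmComum:
--                 DictPermsEmComum[permissao].append(APK)
--             #Senão, cria um par chave-valor com a permissão e a APK em questão
--             else:
--                 DictPermsEmComum[permissao]=[APK]
--
--     #De acordo com o que foi coletado no dicionário de permissões comuns, para cada permissão:
--     for permissao in DictPermsEmComum:
--         #Se só houver um APK com a permissão
--         if len(DictPermsEmComum[permissao])==1:
--             #O APK é o campo [0] da lista
--             APK = DictPermsEmComum[permissao][0]
--             #Se o APK já for chave no dicionário de permissões únicas, só coloca a permissão na lista de valores
--             if APK in DictPermsUnicasPorAPK:
--                 DictPermsUnicasPorAPK[APK].append(permissao)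
--             #Senão, aiciona a permissão na chave APK correspondente
--             else:
--                 DictPermsUnicasPorAPK[APK]=[permissao]
--     #Retorna os dois dicionários
--     return (DictPermsEmComum, DictPermsUnicasPorAPK)
-- ===== SOURCE B (Python) =====
-- def separarPermissoes(DictPermissoesPorAPK):
--     # Counting scheme: flatten once, count each permission's occurrences, then a SINGLE
--     # combined pass builds both dicts (a permission is unique iff its count is 1).
--     pares = [(permissao, APK)
--              for APK, permissoes in DictPermissoesPorAPK.items()
--              for permissao in permissoes]
--     cnt = {}
--     for permissao, _ in pares:
--         cnt[permissao] = cnt.get(permissao, 0) + 1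
--     DictPermsEmComum = {}
--     DictPermsUnicasPorAPK = {}
--     for permissao, APK in pares:
--         DictPermsEmComum.setdefault(permissao, []).append(APK)
--         if cnt[permissao] == 1:
--             DictPermsUnicasPorAPK.setdefault(APK, []).append(permissao)
--     return (DictPermsEmComum, DictPermsUnicasPorAPK)
-- ===== Notes on version B (the rewrite author's own statement) =====
-- stated objective: alternative
-- what changed: B replaces A's invert-then-filter scheme (second loop over the inverted table testing each owner list's length) by a counting scheme: it precomputes an occurrence count per permission and then builds BOTH result dicts in one combined pass over the flattened (permission, APK) pairs, classifying a permission as unique by its count being 1 at its single occurrence.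
import Mathlib
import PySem

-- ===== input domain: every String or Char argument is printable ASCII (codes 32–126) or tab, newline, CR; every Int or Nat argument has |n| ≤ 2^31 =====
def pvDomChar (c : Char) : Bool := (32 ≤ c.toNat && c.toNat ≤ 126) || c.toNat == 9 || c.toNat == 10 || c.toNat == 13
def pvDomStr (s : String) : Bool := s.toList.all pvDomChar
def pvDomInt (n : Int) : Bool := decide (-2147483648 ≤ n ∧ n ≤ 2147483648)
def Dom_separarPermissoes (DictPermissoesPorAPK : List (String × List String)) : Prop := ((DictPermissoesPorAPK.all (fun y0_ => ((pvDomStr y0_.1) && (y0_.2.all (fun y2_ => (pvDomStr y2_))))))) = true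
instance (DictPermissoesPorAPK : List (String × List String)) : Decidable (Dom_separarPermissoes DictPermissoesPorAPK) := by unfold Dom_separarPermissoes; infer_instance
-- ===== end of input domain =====

-- B replaces A's invert-then-filter scheme by a counting scheme: occurrence counts per
-- permission are precomputed, then ONE combined pass over the flattened (permission, APK)
-- pairs builds both dicts (a permission is unique iff its count is 1); objective: alternative.
-- The association-list argument stands for a Python dict and is read through PySem.Dict.ofList
-- (duplicate keys collapse exactly as Python's dict construction does).

-- ===== PORT A =====
def separarPermissoes (DictPermissoesPorAPK : List (String × List String)) : (List (String × List String)) × (List (String × List String)) :=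
  let d := PySem.Dict.ofList DictPermissoesPorAPK
  -- for APK in DictPermissoesPorAPK: for permissao in DictPermissoesPorAPK[APK]: …
  let DictPermsEmComum :=
    d.keys.foldl (fun comum APK =>
      (d.getD APK []).foldl (fun comum permissao =>
        if comum.contains permissao then
          comum.modify permissao [] (fun v => v ++ [APK])        -- DictPermsEmComum[permissao].append(APK)
        else
          comum.insert permissao [APK]) comum) PySem.Dict.empty
  -- for permissao in DictPermsEmComum: …
  let DictPermsUnicasPorAPK :=
    DictPermsEmComum.keys.foldl (fun unicas permissao =>
      let owners := DictPermsEmComum.getD permissao []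
      if owners.length = 1 then
        let APK := owners.headD ""                               -- owners[0] (guarded by length == 1)
        if unicas.contains APK then
          unicas.modify APK [] (fun v => v ++ [permissao])
        else
          unicas.insert APK [permissao]
      else unicas) PySem.Dict.empty
  (DictPermsEmComum.items, DictPermsUnicasPorAPK.items)

-- ===== PORT B =====
def separarPermissoes_alt (DictPermissoesPorAPK : List (String × List String)) : (List (String × List String)) × (List (String × List String)) :=
  let d := PySem.Dict.ofList DictPermissoesPorAPK
  -- pares = [(permissao, APK) for APK, permissoes in d.items() for permissao in permissoes]
  let pares := d.items.flatMap (fun kv => kv.2.map (fun permissao => (permissao, kv.1)))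
  -- cnt[permissao] = cnt.get(permissao, 0) + 1
  let cnt := pares.foldl (fun c q => c.modify q.1 (0 : Int) (fun n => n + 1)) PySem.Dict.empty
  -- one combined pass building both dicts
  let pair := pares.foldl (fun s q =>
      (s.1.modify q.1 [] (fun v => v ++ [q.2]),                  -- comum.setdefault(p, []).append(a)
       if cnt.getD q.1 0 = (1 : Int) then s.2.modify q.2 [] (fun v => v ++ [q.1]) else s.2))
    ((PySem.Dict.empty : PySem.Dict String (List String)), (PySem.Dict.empty : PySem.Dict String (List String)))
  (pair.1.items, pair.2.items)

-- ===== PRECONDITION & SPEC =====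
def Spec_separarPermissoes (DictPermissoesPorAPK : List (String × List String)) (out : (List (String × List String)) × (List (String × List String))) : Prop := out = separarPermissoes_alt DictPermissoesPorAPK
instance (DictPermissoesPorAPK : List (String × List String)) (out : (List (String × List String)) × (List (String × List String))) : Decidable (Spec_separarPermissoes DictPermissoesPorAPK out) := by unfold Spec_separarPermissoes; infer_instance

-- ===== CLAIM (what is proved, stated in full; the proofs are below) =====
def Claim_equal_separarPermissoes : Prop := ∀ (DictPermissoesPorAPK : List (String × List String)), Dom_separarPermissoes DictPermissoesPorAPK → Spec_separarPermissoes DictPermissoesPorAPK (separarPermissoes DictPermissoesPorAPK)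

-- ===== LEMMAS AND PROOFS =====

-- a fold whose two product components evolve independently is the pair of the two folds
lemma foldl_prod_split {α β γ : Type} (l : List α) (f : β → α → β) (g : γ → α → γ)
    (b : β) (c : γ) :
    l.foldl (fun s x => (f s.1 x, g s.2 x)) (b, c) = (l.foldl f b, l.foldl g c) := by
  induction l generalizing b c with
  | nil => rfl
  | cons x t ih => exact ih (f b x) (g c x)

-- 'if k in d: d[k].append(x) else: d[k] = [x]'  IS  d.modify k [] (· ++ [x]).
lemma branch_eq_modify (c : PySem.Dict String (List String)) (p a : String) :
    (if c.contains p then c.modify p [] (fun v => v ++ [a]) else c.insert p [a])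
      = c.modify p [] (fun v => v ++ [a]) := by
  by_cases h : c.contains p
  · simp [h]
  · simp only [Bool.not_eq_true] at h
    simp [h, PySem.Dict.modify, PySem.Dict.getD_of_not_contains c [] h]

-- iterating a Nodup-keyed dict's keys and looking each key up = iterating its items
lemma foldl_keys_getD {γ : Type} (d : PySem.Dict String (List String))
    (h : d.keys.Nodup) (F : γ → String → List String → γ) (init : γ) :
    d.keys.foldl (fun s k => F s k (d.getD k [])) init
      = d.items.foldl (fun s kv => F s kv.1 kv.2) init := by
  rw [PySem.Dict.items_eq_map_keys d h [], List.foldl_map]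

lemma update_filter_of_mem {α : Type} [BEq α] [LawfulBEq α] :
    ∀ (xs : List α) (s : PySem.Set α) (x : α), x ∈ s →
      PySem.Set.update s xs = PySem.Set.update s (xs.filter (fun y => !(y == x))) := by
  intro xs
  induction xs with
  | nil => intro s x _; rfl
  | cons y ys ih =>
    intro s x hx
    by_cases hyx : y = x
    · subst hyx
      simp only [List.filter_cons, BEq.rfl, Bool.not_true, PySem.Set.update]
      show PySem.Set.update (PySem.Set.add s y) ys = _
      rw [PySem.Set.add_of_mem hx]
      exact ih s y hx
    · simp only [List.filter_cons, hyx, Bool.not_eq_true', beq_eq_false_iff_ne,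
        ne_eq, not_false_eq_true, if_pos]
      show PySem.Set.update (PySem.Set.add s y) ys
          = PySem.Set.update (PySem.Set.add s y) (ys.filter (fun y => !(y == x)))
      exact ih _ x (by rw [PySem.Set.mem_add]; exact Or.inl hx)

lemma update_cons_of_not_mem {α : Type} [BEq α] [LawfulBEq α] :
    ∀ (xs : List α) (s : PySem.Set α) (x : α), x ∉ xs →
      PySem.Set.update (x :: s) xs = x :: PySem.Set.update s xs := by
  intro xs
  induction xs with
  | nil => intro s x _; rfl
  | cons y ys ih =>
    intro s x hx
    have hyx : y ≠ x := fun h => hx (by simp [h])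
    show PySem.Set.update (PySem.Set.add (x :: s) y) ys
        = x :: PySem.Set.update (PySem.Set.add s y) ys
    have hadd : PySem.Set.add (x :: s) y = x :: PySem.Set.add s y := by
      rw [PySem.Set.add_eq_ite, PySem.Set.add_eq_ite]
      by_cases hm : y ∈ s
      · simp [hm, List.mem_cons, hyx]
      · simp [hm, List.mem_cons, hyx]
    rw [hadd]
    exact ih _ x (fun h => hx (List.mem_cons_of_mem _ h))

lemma ofList_cons_filter {α : Type} [BEq α] [LawfulBEq α] (x : α) (xs : List α) :
    PySem.Set.ofList (x :: xs) = x :: PySem.Set.ofList (xs.filter (fun y => !(y == x))) := by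
  show PySem.Set.update (PySem.Set.add PySem.Set.empty x) xs = _
  have hadd : PySem.Set.add PySem.Set.empty x = [x] := by
    rw [PySem.Set.add_eq_ite]; simp [PySem.Set.empty]
  rw [hadd, update_filter_of_mem xs [x] x (by simp),
      update_cons_of_not_mem _ [] x (by simp)]
  rfl

-- the group of a key z ≠ p is unaffected by removing the p-keyed pairs
lemma filter_key_filter_ne (t : List (String × String)) (p z : String) (hz : z ≠ p) :
    (t.filter (fun q => !(q.1 == p))).filter (fun q => q.1 == z)
      = t.filter (fun q => q.1 == z) := by
  rw [List.filter_filter]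
  apply List.filter_congr
  intro q _
  by_cases h : q.1 = z
  · simp [h, hz]
  · simp [h]

-- the permission→owners group of key p, read off the flattened pair stream
def grp (l : List (String × String)) (p : String) : List String :=
  (l.filter (fun q => q.1 == p)).map (fun x => x.2)

def selKey (l : List (String × String)) (p : String) : Option (String × String) :=
  if (grp l p).length = 1 then some ((grp l p).headD "", p) else none

def selPair (l : List (String × String)) (q : String × String) : Option (String × String) :=
  if (grp l q.1).length = 1 then some (q.2, q.1) else none

lemma grp_cons_ne (p a z : String) (t : List (String × String)) (hz : z ≠ p) :
    grp ((p, a) :: t) z = grp t z := by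
  simp [grp, Ne.symm hz]

lemma grp_filter_ne (t : List (String × String)) (p z : String) (hz : z ≠ p) :
    grp (t.filter (fun q => !(q.1 == p))) z = grp t z := by
  unfold grp
  rw [filter_key_filter_ne t p z hz]

lemma selKey_cons_ne (p a z : String) (t : List (String × String)) (hz : z ≠ p) :
    selKey ((p, a) :: t) z = selKey t z := by
  simp [selKey, grp_cons_ne p a z t hz]

lemma selKey_filter_ne (t : List (String × String)) (p z : String) (hz : z ≠ p) :
    selKey (t.filter (fun q => !(q.1 == p))) z = selKey t z := by
  simp [selKey, grp_filter_ne t p z hz]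

lemma selPair_cons_ne (p a : String) (t : List (String × String)) (q : String × String)
    (hz : q.1 ≠ p) : selPair ((p, a) :: t) q = selPair t q := by
  simp [selPair, grp_cons_ne p a q.1 t hz]

lemma selPair_filter_ne (t : List (String × String)) (p : String) (q : String × String)
    (hz : q.1 ≠ p) : selPair (t.filter (fun r => !(r.1 == p))) q = selPair t q := by
  simp [selPair, grp_filter_ne t p q.1 hz]

-- CRUX: picking the singleton groups out of the inverted table (in key-first-occurrence order)
-- is the same as scanning the pair stream and keeping the pairs whose group is a singleton.
lemma crux : ∀ (n : Nat) (l : List (String × String)), l.length ≤ n →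
    (PySem.Set.ofList (l.map (fun q => q.1))).filterMap (selKey l)
      = l.filterMap (selPair l) := by
  intro n
  induction n with
  | zero =>
    intro l hl
    have : l = [] := List.eq_nil_of_length_eq_zero (Nat.le_zero.mp hl)
    subst this; rfl
  | succ n ih =>
    intro l hl
    match l with
    | [] => rfl
    | (p, a) :: t =>
      have hlt : t.length ≤ n := by simp at hl; omega
      have hmap : ((p, a) :: t).map (fun q => q.1) = p :: t.map (fun q => q.1) := rfl
      rw [hmap, ofList_cons_filter]
      have hfm : (t.map (fun q => q.1)).filter (fun y => !(y == p))
          = (t.filter (fun q => !(q.1 == p))).map (fun q => q.1) := by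
        rw [List.filter_map]; rfl
      rw [hfm]
      by_cases hc : t.filter (fun q => q.1 == p) = []
      · -- p occurs only once in l
        have hnone : ∀ q ∈ t, q.1 ≠ p := by
          intro q hq hqp
          have := List.filter_eq_nil_iff.mp hc q hq
          simp [hqp] at this
        have ht' : t.filter (fun q => !(q.1 == p)) = t :=
          List.filter_eq_self.mpr (fun q hq => by simp [hnone q hq])
        have hgrp : grp ((p, a) :: t) p = [a] := by
          simp [grp, hc]
        rw [ht']
        have hsel : selKey ((p, a) :: t) p = some (a, p) := by simp [selKey, hgrp]
        have hselp : selPair ((p, a) :: t) (p, a) = some (a, p) := by simp [selPair, hgrp]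
        simp only [List.filterMap_cons, hsel, hselp]
        congr 1
        have hcongr1 : (PySem.Set.ofList (t.map (fun q => q.1))).filterMap (selKey ((p, a) :: t))
            = (PySem.Set.ofList (t.map (fun q => q.1))).filterMap (selKey t) := by
          apply List.filterMap_congr
          intro x hx
          rw [PySem.Set.mem_ofList] at hx
          obtain ⟨q, hq, rfl⟩ := List.mem_map.mp hx
          exact selKey_cons_ne p a q.1 t (hnone q hq)
        have hcongr2 : t.filterMap (selPair ((p, a) :: t)) = t.filterMap (selPair t) :=
          List.filterMap_congr (fun q hq => selPair_cons_ne p a t q (hnone q hq))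
        rw [hcongr1, hcongr2]
        exact ih t hlt
      · -- p occurs at least twice in l : both sides drop every p-keyed pair
        have hlen : (t.filter (fun q => q.1 == p)).length ≠ 0 := by
          simpa [List.length_eq_zero_iff] using hc
        have hgrp : (grp ((p, a) :: t) p).length ≠ 1 := by
          simp only [grp, List.filter_cons, BEq.rfl, if_pos, List.map_cons, List.length_cons,
            List.length_map]
          omega
        have hsel : selKey ((p, a) :: t) p = none := by simp [selKey, hgrp]
        have hselp : selPair ((p, a) :: t) (p, a) = none := by simp [selPair, hgrp]
        simp only [List.filterMap_cons, hsel, hselp]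
        have hcongr1 : (PySem.Set.ofList ((t.filter (fun q => !(q.1 == p))).map (fun q => q.1))).filterMap (selKey ((p, a) :: t))
            = (PySem.Set.ofList ((t.filter (fun q => !(q.1 == p))).map (fun q => q.1))).filterMap (selKey (t.filter (fun q => !(q.1 == p)))) := by
          apply List.filterMap_congr
          intro x hx
          rw [PySem.Set.mem_ofList] at hx
          obtain ⟨q, hq, rfl⟩ := List.mem_map.mp hx
          have hqp : q.1 ≠ p := by
            have := (List.mem_filter.mp hq).2
            simpa using this
          rw [selKey_cons_ne p a q.1 t hqp, selKey_filter_ne t p q.1 hqp]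
        rw [hcongr1, ih _ (le_trans (List.length_filter_le _ _) hlt)]
        rw [List.filterMap_filter]
        apply List.filterMap_congr
        intro q hq
        by_cases hqp : q.1 = p
        · have hg : (grp ((p, a) :: t) q.1).length ≠ 1 := by
            rw [hqp]
            simp only [grp, List.filter_cons, BEq.rfl, if_pos, List.map_cons, List.length_cons,
              List.length_map]
            omega
          have hnone : selPair ((p, a) :: t) q = none := by simp [selPair, hg]
          rw [hnone, hqp]
          simp
        · rw [selPair_cons_ne p a t q hqp]
          rw [if_pos (by simp [hqp]), selPair_filter_ne t p q hqp]

-- the count table over the pair stream reads off each key's group length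
lemma cnt_getD (pares : List (String × String)) (z : String) :
    (pares.foldl (fun c q => c.modify q.1 (0 : Int) (fun n => n + 1)) PySem.Dict.empty).getD z 0
      = ((grp pares z).length : Int) := by
  have h1 : pares.foldl (fun c q => c.modify q.1 (0 : Int) (fun n => n + 1)) PySem.Dict.empty
      = (pares.map (fun q => q.1)).foldl (fun c x => c.modify x (0 : Int) (fun n => n + 1)) PySem.Dict.empty := by
    rw [List.foldl_map]
  rw [h1, PySem.Dict.getD_foldl_modify_add_one, PySem.Dict.getD_empty]
  simp only [grp, List.length_map, List.count, List.countP_eq_length_filter]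
  rw [List.filter_map, List.length_map]
  have hcomp : ((fun x => x == z) ∘ fun q : String × String => q.1)
      = (fun q : String × String => q.1 == z) := rfl
  rw [hcomp]
  omega

-- Pass 1 of A (nested key-iteration with membership branching) builds the same inverted dict
-- as B's comum component (flat modify-fold over the flattened pair stream).
lemma pass1_eq (d : PySem.Dict String (List String)) (hd : d.keys.Nodup) :
    d.keys.foldl (fun comum APK =>
        (d.getD APK []).foldl (fun comum permissao =>
          if comum.contains permissao then
            comum.modify permissao [] (fun v => v ++ [APK])
          else
            comum.insert permissao [APK]) comum) PySem.Dict.empty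
      = (d.items.flatMap (fun kv => kv.2.map (fun permissao => (permissao, kv.1)))).foldl
          (fun comum q => comum.modify q.1 [] (fun v => v ++ [q.2])) PySem.Dict.empty := by
  have h1 : d.keys.foldl (fun comum APK =>
        (d.getD APK []).foldl (fun comum permissao =>
          if comum.contains permissao then
            comum.modify permissao [] (fun v => v ++ [APK])
          else
            comum.insert permissao [APK]) comum) PySem.Dict.empty
      = d.items.foldl (fun s kv =>
          kv.2.foldl (fun c p =>
            if c.contains p then c.modify p [] (fun v => v ++ [kv.1])
            else c.insert p [kv.1]) s) PySem.Dict.empty :=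
    foldl_keys_getD d hd
      (fun s k v => v.foldl (fun c p =>
        if c.contains p then c.modify p [] (fun w => w ++ [k]) else c.insert p [k]) s)
      PySem.Dict.empty
  rw [h1, List.foldl_flatMap]
  simp only [List.foldl_map, branch_eq_modify]

-- Pass 2 of A (filtering the inverted table for singleton groups) builds the same dict as
-- B's unicas component (appending at each occurrence of a count-1 permission).
lemma pass2_eq (pares : List (String × String)) :
    (pares.foldl (fun comum q => comum.modify q.1 [] (fun v => v ++ [q.2])) PySem.Dict.empty).keys.foldl
        (fun unicas permissao =>
          let owners := (pares.foldl (fun comum q => comum.modify q.1 [] (fun v => v ++ [q.2])) PySem.Dict.empty).getD permissao []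
          if owners.length = 1 then
            let APK := owners.headD ""
            if unicas.contains APK then
              unicas.modify APK [] (fun v => v ++ [permissao])
            else
              unicas.insert APK [permissao]
          else unicas) PySem.Dict.empty
      = pares.foldl (fun unicas q =>
          if ((pares.foldl (fun c q => c.modify q.1 (0 : Int) (fun n => n + 1)) PySem.Dict.empty).getD q.1 0) = 1 then
            unicas.modify q.2 [] (fun v => v ++ [q.1])
          else unicas) PySem.Dict.empty := by
  set C := pares.foldl (fun comum q => comum.modify q.1 [] (fun v => v ++ [q.2])) PySem.Dict.empty with hC
  have hnod : C.keys.Nodup := by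
    rw [hC]
    exact PySem.Dict.nodup_keys_foldl_modify_key pares (fun q => q.1) []
      (fun _ q => fun v => v ++ [q.2]) PySem.Dict.empty PySem.Dict.nodup_keys_empty
  have hget : ∀ z, C.getD z [] = grp pares z := by
    intro z
    rw [hC, PySem.Dict.getD_foldl_modify_append pares PySem.Dict.empty z,
      PySem.Dict.getD_empty]
    rfl
  have hkeys : C.keys = PySem.Set.ofList (pares.map (fun q => q.1)) := by
    rw [hC, PySem.Dict.keys_foldl_modify_key pares (fun q => q.1) []
      (fun _ q => fun v => v ++ [q.2]) PySem.Dict.empty, PySem.Dict.keys_empty]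
    rfl
  -- A's pass 2 as a fold over the keys with their groups
  have hA : C.keys.foldl
        (fun unicas permissao =>
          let owners := C.getD permissao []
          if owners.length = 1 then
            let APK := owners.headD ""
            if unicas.contains APK then
              unicas.modify APK [] (fun v => v ++ [permissao])
            else
              unicas.insert APK [permissao]
          else unicas) PySem.Dict.empty
      = (C.keys.filterMap (selKey pares)).foldl
          (fun u y => u.modify y.1 [] (fun v => v ++ [y.2])) PySem.Dict.empty := by
    rw [List.foldl_filterMap]
    apply PySem.List.foldl_congr_mem
    intro u z _
    show (let owners := C.getD z []
          if owners.length = 1 then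
            let APK := owners.headD ""
            if u.contains APK then u.modify APK [] (fun v => v ++ [z])
            else u.insert APK [z]
          else u)
        = _
    simp only [hget z, branch_eq_modify, selKey]
    by_cases h1 : (grp pares z).length = 1
    · simp [h1]
    · simp [h1]
  -- B's unicas component as a fold over the selected pairs
  have hB : pares.foldl (fun unicas q =>
          if ((pares.foldl (fun c q => c.modify q.1 (0 : Int) (fun n => n + 1)) PySem.Dict.empty).getD q.1 0) = 1 then
            unicas.modify q.2 [] (fun v => v ++ [q.1])
          else unicas) PySem.Dict.empty
      = (pares.filterMap (selPair pares)).foldl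
          (fun u y => u.modify y.1 [] (fun v => v ++ [y.2])) PySem.Dict.empty := by
    rw [List.foldl_filterMap]
    apply PySem.List.foldl_congr_mem
    intro u q _
    simp only [cnt_getD pares q.1, selPair]
    by_cases h1 : (grp pares q.1).length = 1
    · simp [h1]
    · simp [h1]
  rw [hA, hB, hkeys, crux pares.length pares le_rfl]

-- ===== VERDICT (by name: the statement is the Claim_ definition above) =====
theorem separarPermissoes_spec : Claim_equal_separarPermissoes := by
  intro d0 _
  unfold Spec_separarPermissoes separarPermissoes separarPermissoes_alt
  simp only []
  rw [foldl_prod_split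
        ((PySem.Dict.ofList d0).items.flatMap (fun kv => kv.2.map (fun permissao => (permissao, kv.1))))
        (fun (c : PySem.Dict String (List String)) (q : String × String) =>
          c.modify q.1 [] (fun v => v ++ [q.2]))
        (fun (u : PySem.Dict String (List String)) (q : String × String) =>
          if (((PySem.Dict.ofList d0).items.flatMap (fun kv => kv.2.map (fun permissao => (permissao, kv.1)))).foldl
                (fun c q => c.modify q.1 (0 : Int) (fun n => n + 1)) PySem.Dict.empty).getD q.1 0 = 1 then
            u.modify q.2 [] (fun v => v ++ [q.1])
          else u)
        PySem.Dict.empty PySem.Dict.empty]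
  rw [pass1_eq (PySem.Dict.ofList d0) (PySem.Dict.nodup_keys_ofList d0)]
  rw [pass2_eq]
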